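-- pv_equiv track=rewrite | github.com/tkmtakada/Automatic-rubik-s-cube-solver | vision/second_camera.py | str2int
-- ===== SOURCE A (Python) =====
-- def str2int(lst):#['D2', 'R3', 'D3', 'F2', 'B', 'D', 'R2', 'D2', 'R3', 'F2', 'D3', 'F2', 'U3', 'B2', 'L2', 'U2', 'D', 'R2', 'U'] -> int
--     new_lst = []
--     for i in range(len(lst)):
--         if lst[i] == 'F':new_lst.append(11)
--         elif lst[i] == 'F2':new_lst.append(12)
--         elif lst[i] == 'F3':new_lst.append(13)
--         elif lst[i] == 'B':new_lst.append(21)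
--         elif lst[i] == 'B2':new_lst.append(22)
--         elif lst[i] == 'B3':new_lst.append(23)
--         elif lst[i] == 'L':new_lst.append(31)
--         elif lst[i] == 'L2':new_lst.append(32)
--         elif lst[i] == 'L3':new_lst.append(33)
--         elif lst[i] == 'R':new_lst.append(41)
--         elif lst[i] == 'R2':new_lst.append(42)
--         elif lst[i] == 'R3':new_lst.append(43)
--         elif lst[i] == 'U':new_lst.append(51)
--         elif lst[i] == 'U2':new_lst.append(52)
--         elif lst[i] == 'U3':new_lst.append(53)
--         elif lst[i] == 'D':new_lst.append(61)
--         elif lst[i] == 'D2':new_lst.append(62)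
--         elif lst[i] == 'D3':new_lst.append(63)
--         else:pass
--     return new_lst
-- ===== SOURCE B (Python) =====
-- def str2int(lst):
--     faces = {'F': 1, 'B': 2, 'L': 3, 'R': 4, 'U': 5, 'D': 6}
--     amounts = {'': 1, '2': 2, '3': 3}
--     new_lst = []
--     for i in range(len(lst)):
--         face = faces.get(lst[i][:1])
--         amount = amounts.get(lst[i][1:])
--         if face is not None and amount is not None:
--             new_lst.append(10 * face + amount)
--     return new_lst
-- ===== Notes on version B (the rewrite author's own statement) =====
-- stated objective: simpler
-- what changed: Replaces the 18-way if/elif chain with a parse: each move is split into its first character and rotation suffix, both looked up in two small dicts (face 1-6, amount 1-3), emitting 10*face+amount and skipping elements where either lookup fails.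
import Mathlib
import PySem

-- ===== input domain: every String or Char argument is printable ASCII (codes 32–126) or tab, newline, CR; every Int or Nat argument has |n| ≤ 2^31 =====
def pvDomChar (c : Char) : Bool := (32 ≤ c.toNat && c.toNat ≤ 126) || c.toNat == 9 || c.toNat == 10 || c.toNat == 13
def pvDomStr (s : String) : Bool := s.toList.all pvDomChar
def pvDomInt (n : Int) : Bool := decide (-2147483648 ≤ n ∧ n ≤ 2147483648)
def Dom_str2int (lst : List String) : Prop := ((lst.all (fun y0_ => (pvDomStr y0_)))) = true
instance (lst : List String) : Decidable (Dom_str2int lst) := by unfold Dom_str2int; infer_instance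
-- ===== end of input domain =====

-- B replaces A's 18-way if/elif chain by parsing each move into face character and
-- rotation suffix, looked up in two small dicts, emitting 10*face+amount (objective: simpler).

-- ===== PORT A =====
-- literal transliteration: 'for i in range(len(lst)):' with the 18-way if/elif chain on lst[i]
def str2int (lst : List String) : List Int :=
  (PySem.List.pyRange 0 lst.length 1).foldl (fun new_lst i =>
    let s := PySem.List.pyGetD lst i ""
    if s == "F" then new_lst ++ [11] else if s == "F2" then new_lst ++ [12]
    else if s == "F3" then new_lst ++ [13] else if s == "B" then new_lst ++ [21]
    else if s == "B2" then new_lst ++ [22] else if s == "B3" then new_lst ++ [23]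
    else if s == "L" then new_lst ++ [31] else if s == "L2" then new_lst ++ [32]
    else if s == "L3" then new_lst ++ [33] else if s == "R" then new_lst ++ [41]
    else if s == "R2" then new_lst ++ [42] else if s == "R3" then new_lst ++ [43]
    else if s == "U" then new_lst ++ [51] else if s == "U2" then new_lst ++ [52]
    else if s == "U3" then new_lst ++ [53] else if s == "D" then new_lst ++ [61]
    else if s == "D2" then new_lst ++ [62] else if s == "D3" then new_lst ++ [63]
    else new_lst) []

-- ===== PORT B =====
-- faces = {'F': 1, 'B': 2, 'L': 3, 'R': 4, 'U': 5, 'D': 6}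
def pvFaces : PySem.Dict String Int :=
  PySem.Dict.ofList [("F",1),("B",2),("L",3),("R",4),("U",5),("D",6)]
-- amounts = {'': 1, '2': 2, '3': 3}
def pvAmounts : PySem.Dict String Int :=
  PySem.Dict.ofList [("",1),("2",2),("3",3)]

-- face = faces.get(lst[i][:1]); amount = amounts.get(lst[i][1:]); append 10*face+amount if both found
def str2int_alt (lst : List String) : List Int :=
  (PySem.List.pyRange 0 lst.length 1).foldl (fun new_lst i =>
    let s := PySem.List.pyGetD lst i ""
    match pvFaces.get? (PySem.Str.slice s none (some 1)),
          pvAmounts.get? (PySem.Str.slice s (some 1) none) with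
    | some face, some amount => new_lst ++ [10 * face + amount]
    | _, _ => new_lst) []

-- ===== PRECONDITION & SPEC =====
def Spec_str2int (lst : List String) (out : List Int) : Prop := out = str2int_alt lst
instance (lst : List String) (out : List Int) : Decidable (Spec_str2int lst out) := by unfold Spec_str2int; infer_instance

-- ===== CLAIM (what is proved, stated in full; the proofs are below) =====
def Claim_equal_str2int : Prop := ∀ (lst : List String), Dom_str2int lst → Spec_str2int lst (str2int lst)

-- ===== LEMMAS AND PROOFS =====

-- the element A's loop body appends for one move string
def fA (s : String) : List Int :=
  if s == "F" then [11] else if s == "F2" then [12] else if s == "F3" then [13]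
  else if s == "B" then [21] else if s == "B2" then [22] else if s == "B3" then [23]
  else if s == "L" then [31] else if s == "L2" then [32] else if s == "L3" then [33]
  else if s == "R" then [41] else if s == "R2" then [42] else if s == "R3" then [43]
  else if s == "U" then [51] else if s == "U2" then [52] else if s == "U3" then [53]
  else if s == "D" then [61] else if s == "D2" then [62] else if s == "D3" then [63]
  else []

-- the element B's loop body appends for one move string
def fB (s : String) : List Int :=
  match pvFaces.get? (PySem.Str.slice s none (some 1)),
        pvAmounts.get? (PySem.Str.slice s (some 1) none) with
  | some face, some amount => [10 * face + amount]
  | _, _ => []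

lemma faces_get (x : String) :
    pvFaces.get? x = if x = "F" then some 1 else if x = "B" then some 2 else if x = "L" then some 3 else if x = "R" then some 4 else if x = "U" then some 5 else if x = "D" then some 6 else none := by
  have hd : pvFaces = PySem.Dict.mk [("F",1),("B",2),("L",3),("R",4),("U",5),("D",6)] := by decide
  rw [hd]
  by_cases h0 : x = "F"
  · subst h0; decide
  by_cases h1 : x = "B"
  · subst h1; decide
  by_cases h2 : x = "L"
  · subst h2; decide
  by_cases h3 : x = "R"
  · subst h3; decide
  by_cases h4 : x = "U"
  · subst h4; decide
  by_cases h5 : x = "D"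
  · subst h5; decide
  simp only [if_neg h0, if_neg h1, if_neg h2, if_neg h3, if_neg h4, if_neg h5, PySem.Dict.get?]
  simp [Ne.symm h0, Ne.symm h1, Ne.symm h2, Ne.symm h3, Ne.symm h4, Ne.symm h5]

lemma amts_get (x : String) :
    pvAmounts.get? x = if x = "" then some 1 else if x = "2" then some 2 else if x = "3" then some 3 else none := by
  have hd : pvAmounts = PySem.Dict.mk [("",1),("2",2),("3",3)] := by decide
  rw [hd]
  by_cases h0 : x = ""
  · subst h0; decide
  by_cases h1 : x = "2"
  · subst h1; decide
  by_cases h2 : x = "3"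
  · subst h2; decide
  simp only [if_neg h0, if_neg h1, if_neg h2, PySem.Dict.get?]
  simp [Ne.symm h0, Ne.symm h1, Ne.symm h2]


set_option maxHeartbeats 2000000 in
lemma step_eq (s : String) : fA s = fB s := by
  have h1 : (PySem.Str.slice s none (some 1)).toList = s.toList.take 1 := by
    simp [pysem, PySem.List.slice_to]
  have h2 : (PySem.Str.slice s (some 1) none).toList = s.toList.drop 1 := by
    simp [pysem, PySem.List.slice_from]
  simp only [fA, fB, faces_get, amts_get, beq_iff_eq, String.ext_iff, h1, h2,
    (show "F".toList = (['F'] : List Char) from by decide),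
    (show "F2".toList = (['F', '2'] : List Char) from by decide),
    (show "F3".toList = (['F', '3'] : List Char) from by decide),
    (show "B".toList = (['B'] : List Char) from by decide),
    (show "B2".toList = (['B', '2'] : List Char) from by decide),
    (show "B3".toList = (['B', '3'] : List Char) from by decide),
    (show "L".toList = (['L'] : List Char) from by decide),
    (show "L2".toList = (['L', '2'] : List Char) from by decide),
    (show "L3".toList = (['L', '3'] : List Char) from by decide),
    (show "R".toList = (['R'] : List Char) from by decide),
    (show "R2".toList = (['R', '2'] : List Char) from by decide),
    (show "R3".toList = (['R', '3'] : List Char) from by decide),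
    (show "U".toList = (['U'] : List Char) from by decide),
    (show "U2".toList = (['U', '2'] : List Char) from by decide),
    (show "U3".toList = (['U', '3'] : List Char) from by decide),
    (show "D".toList = (['D'] : List Char) from by decide),
    (show "D2".toList = (['D', '2'] : List Char) from by decide),
    (show "D3".toList = (['D', '3'] : List Char) from by decide),
    (show "".toList = ([] : List Char) from by decide),
    (show "2".toList = (['2'] : List Char) from by decide),
    (show "3".toList = (['3'] : List Char) from by decide)]
  clear h1 h2
  generalize s.toList = cs
  rcases cs with _ | ⟨c, t⟩
  · simp
  · rcases t with _ | ⟨d, u⟩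
    · simp only [List.take_succ_cons, List.take_zero, List.drop_succ_cons, List.drop_zero,
        List.cons.injEq, and_true, reduceCtorEq, and_false, if_false]
      by_cases hc0 : c = 'F'
      · subst hc0
        decide
      by_cases hc1 : c = 'B'
      · subst hc1
        decide
      by_cases hc2 : c = 'L'
      · subst hc2
        decide
      by_cases hc3 : c = 'R'
      · subst hc3
        decide
      by_cases hc4 : c = 'U'
      · subst hc4
        decide
      by_cases hc5 : c = 'D'
      · subst hc5
        decide
      simp [hc0, hc1, hc2, hc3, hc4, hc5]
    · rcases u with _ | ⟨e, v⟩
      · simp only [List.take_succ_cons, List.take_zero, List.drop_succ_cons, List.drop_zero,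
          List.cons.injEq, and_true, reduceCtorEq, and_false, if_false]
        by_cases hc0 : c = 'F'
        · subst hc0
          by_cases hd2 : d = '2'
          · subst hd2; decide
          by_cases hd3 : d = '3'
          · subst hd3; decide
          simp [hd2, hd3]
        by_cases hc1 : c = 'B'
        · subst hc1
          by_cases hd2 : d = '2'
          · subst hd2; decide
          by_cases hd3 : d = '3'
          · subst hd3; decide
          simp [hd2, hd3]
        by_cases hc2 : c = 'L'
        · subst hc2
          by_cases hd2 : d = '2'
          · subst hd2; decide
          by_cases hd3 : d = '3'
          · subst hd3; decide
          simp [hd2, hd3]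
        by_cases hc3 : c = 'R'
        · subst hc3
          by_cases hd2 : d = '2'
          · subst hd2; decide
          by_cases hd3 : d = '3'
          · subst hd3; decide
          simp [hd2, hd3]
        by_cases hc4 : c = 'U'
        · subst hc4
          by_cases hd2 : d = '2'
          · subst hd2; decide
          by_cases hd3 : d = '3'
          · subst hd3; decide
          simp [hd2, hd3]
        by_cases hc5 : c = 'D'
        · subst hc5
          by_cases hd2 : d = '2'
          · subst hd2; decide
          by_cases hd3 : d = '3'
          · subst hd3; decide
          simp [hd2, hd3]
        simp [hc0, hc1, hc2, hc3, hc4, hc5]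
      · simp only [List.take_succ_cons, List.take_zero, List.drop_succ_cons, List.drop_zero,
          List.cons.injEq, and_true, reduceCtorEq, and_false, if_false]
        by_cases hc0 : c = 'F'
        · subst hc0
          simp
        by_cases hc1 : c = 'B'
        · subst hc1
          simp
        by_cases hc2 : c = 'L'
        · subst hc2
          simp
        by_cases hc3 : c = 'R'
        · subst hc3
          simp
        by_cases hc4 : c = 'U'
        · subst hc4
          simp
        by_cases hc5 : c = 'D'
        · subst hc5
          simp
        simp [hc0, hc1, hc2, hc3, hc4, hc5]

lemma bodyA_eq (acc : List Int) (s : String) :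
    (if s == "F" then acc ++ [11] else if s == "F2" then acc ++ [12]
    else if s == "F3" then acc ++ [13] else if s == "B" then acc ++ [21]
    else if s == "B2" then acc ++ [22] else if s == "B3" then acc ++ [23]
    else if s == "L" then acc ++ [31] else if s == "L2" then acc ++ [32]
    else if s == "L3" then acc ++ [33] else if s == "R" then acc ++ [41]
    else if s == "R2" then acc ++ [42] else if s == "R3" then acc ++ [43]
    else if s == "U" then acc ++ [51] else if s == "U2" then acc ++ [52]
    else if s == "U3" then acc ++ [53] else if s == "D" then acc ++ [61]
    else if s == "D2" then acc ++ [62] else if s == "D3" then acc ++ [63]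
    else acc) = acc ++ fA s := by
  simp only [fA, apply_ite (fun l => acc ++ l), List.append_nil]

lemma str2int_eq_flatMap (lst : List String) : str2int lst = lst.flatMap fA := by
  have h1 : str2int lst = (PySem.List.pyRange 0 lst.length 1).foldl
      (fun acc i => acc ++ fA (PySem.List.pyGetD lst i "")) [] := by
    unfold str2int
    congr 1
    funext acc i
    exact bodyA_eq acc _
  rw [h1, PySem.List.foldl_pyRange_zero_pyGetD' lst "" (fun acc s => acc ++ fA s) []]
  simpa using PySem.List.foldl_append_eq_flatMap fA lst []

lemma str2int_alt_eq_flatMap (lst : List String) : str2int_alt lst = lst.flatMap fB := by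
  have h1 : str2int_alt lst = (PySem.List.pyRange 0 lst.length 1).foldl
      (fun acc i => acc ++ fB (PySem.List.pyGetD lst i "")) [] := by
    unfold str2int_alt
    congr 1
    funext acc i
    rcases hf : pvFaces.get? (PySem.Str.slice (PySem.List.pyGetD lst i "") none (some 1)) with _ | f <;>
      rcases ha : pvAmounts.get? (PySem.Str.slice (PySem.List.pyGetD lst i "") (some 1) none) with _ | a <;>
      simp [fB, hf, ha]
  rw [h1, PySem.List.foldl_pyRange_zero_pyGetD' lst "" (fun acc s => acc ++ fB s) []]
  simpa using PySem.List.foldl_append_eq_flatMap fB lst []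

-- ===== VERDICT (by name: the statement is the Claim_ definition above) =====
theorem str2int_spec : Claim_equal_str2int := by
  intro lst _
  unfold Spec_str2int
  rw [str2int_eq_flatMap, str2int_alt_eq_flatMap]
  exact List.flatMap_congr (fun s _ => step_eq s)
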